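-- pv_equiv track=rewrite | github.com/chopdev/leetcode_tasks | dynamic_programming/CtCI_8_2_robot_in_grid/Solution.py | dfs
-- ===== SOURCE A (Python) =====
-- from typing import List
--
-- def dfs(grid: List[List[int]], res: List[tuple], visited: set[tuple], row_count: int, col_count: int, i: int, j: int) -> bool:
--     if (i == row_count - 1 and j == col_count - 1):
--         res.append((i, j))
--         return True
--
--     if (i >= row_count or j >= col_count or grid[i][j] == 1 or (i, j) in visited):
--         return False
--
--     res.append((i, j))
--     visited.add((i, j))
--     found = dfs(grid, res, visited, row_count, col_count, i + 1, j)
--     if found: return True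
--
--     found = dfs(grid, res, visited, row_count, col_count, i, j + 1)
--     if not found: res.pop()
--
--     return found
-- ===== SOURCE B (Python) =====
-- from typing import List
--
-- def dfs(grid: List[List[int]], res: List[tuple], visited: set[tuple], row_count: int, col_count: int, i: int, j: int) -> bool:
--     # Same entry checks as the task demands (target accepted before any other test).
--     if i == row_count - 1 and j == col_count - 1:
--         res.append((i, j))
--         return True
--     if i >= row_count or j >= col_count or grid[i][j] == 1 or (i, j) in visited:
--         return False
--     # Bottom-up DP over the box [i, row_count) x [j, col_count): reach[(r, c)] is True
--     # iff the target is reachable from (r, c) by down/right moves through open cells.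
--     reach = {}
--     for r in range(row_count - 1, i - 1, -1):
--         for c in range(col_count - 1, j - 1, -1):
--             if r == row_count - 1 and c == col_count - 1:
--                 reach[(r, c)] = True
--             elif grid[r][c] == 1 or (r, c) in visited:
--                 reach[(r, c)] = False
--             else:
--                 reach[(r, c)] = reach.get((r + 1, c), False) or reach.get((r, c + 1), False)
--     if not reach[(i, j)]:
--         return False
--     # Success: write the down-first path into res (and mark its cells visited), as the
--     # recursive search would.
--     r, c = i, j
--     while not (r == row_count - 1 and c == col_count - 1):
--         res.append((r, c))
--         visited.add((r, c))
--         if reach.get((r + 1, c), False):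
--             r += 1
--         else:
--             c += 1
--     res.append((r, c))
--     return True
-- ===== Notes on version B (the rewrite author's own statement) =====
-- stated objective: alternative
-- what changed: The recursive backtracking DFS (mutating res/visited as failure memo) is replaced by an iterative bottom-up dynamic-programming table of reachability over the box [i,row_count)x[j,col_count), followed by a greedy down-first path reconstruction; equivalence is proved for the returned bool (both also leave the found path in res on success, but B does not record failed cells in visited).
-- outside the precondition, e.g. on dfs([[0], [0, 0]], [], set(), 2, 2, 0, 0): A returns True, B raises IndexError; on dfs([[0]], [], set(), 2, 1, 0, 0): A returns True, B returns True
import Mathlib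
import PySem

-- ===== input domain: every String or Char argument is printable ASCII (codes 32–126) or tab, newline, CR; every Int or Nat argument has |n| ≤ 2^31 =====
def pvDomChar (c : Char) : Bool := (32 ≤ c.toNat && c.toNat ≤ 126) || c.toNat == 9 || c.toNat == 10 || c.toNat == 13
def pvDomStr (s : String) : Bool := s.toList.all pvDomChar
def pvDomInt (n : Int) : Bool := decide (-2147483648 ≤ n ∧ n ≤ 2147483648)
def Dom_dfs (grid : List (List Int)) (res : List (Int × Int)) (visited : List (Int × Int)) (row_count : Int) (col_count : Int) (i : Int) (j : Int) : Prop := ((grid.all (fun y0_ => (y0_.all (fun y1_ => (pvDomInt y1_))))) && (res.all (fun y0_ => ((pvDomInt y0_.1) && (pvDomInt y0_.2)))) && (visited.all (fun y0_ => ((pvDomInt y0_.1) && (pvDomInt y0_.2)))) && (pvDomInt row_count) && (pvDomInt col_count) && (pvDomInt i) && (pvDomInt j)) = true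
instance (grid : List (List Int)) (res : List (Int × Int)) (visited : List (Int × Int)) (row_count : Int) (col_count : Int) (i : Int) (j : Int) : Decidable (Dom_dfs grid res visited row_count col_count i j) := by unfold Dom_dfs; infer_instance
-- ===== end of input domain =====

-- B replaces the recursive backtracking DFS by an iterative bottom-up DP reachability table
-- over the box [i,row_count)×[j,col_count) plus a greedy path reconstruction (objective:
-- alternative). Both Pythons mutate res/visited; the signature returns only the bool, so the
-- equivalence proved here is about the RETURN VALUE (on success both also append the same
-- down-first path to res; B does not record failed cells in visited).

-- grid[i][j], exact whenever the access is in range (Pre_dfs guarantees that for every access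
-- either program performs); out of range Python raises IndexError and we return 0 instead.
def cellAt (grid : List (List Int)) (r c : Int) : Int :=
  match PySem.List.pyGet? grid r with
  | none => 0
  | some row => (PySem.List.pyGet? row c).getD 0

-- ===== PORT A =====
-- returns (found, res, visited) threading the two mutated arguments through the recursion
def dfsAux (grid : List (List Int)) (rc cc : Int) (i j : Int) (res vis : List (Int × Int)) :
    Bool × List (Int × Int) × List (Int × Int) :=
  if i = rc - 1 ∧ j = cc - 1 then (true, res ++ [(i, j)], vis)
  else if rc ≤ i ∨ cc ≤ j ∨ cellAt grid i j = 1 ∨ (i, j) ∈ vis then (false, res, vis)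
  else
    let p1 := dfsAux grid rc cc (i + 1) j (res ++ [(i, j)]) (PySem.Set.add vis (i, j))
    if p1.1 then (true, p1.2.1, p1.2.2)
    else
      let p2 := dfsAux grid rc cc i (j + 1) p1.2.1 p1.2.2
      if p2.1 then (true, p2.2.1, p2.2.2) else (false, p2.2.1.dropLast, p2.2.2)
termination_by ((rc - i).toNat + (cc - j).toNat)
decreasing_by
  all_goals ((try simp only [not_or, not_le] at *); omega)

def dfs (grid : List (List Int)) (res : List (Int × Int)) (visited : List (Int × Int)) (row_count : Int) (col_count : Int) (i : Int) (j : Int) : Bool :=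
  (dfsAux grid row_count col_count i j res visited).1

-- ===== PORT B =====
-- one DP cell: reach[(r,c)] = True | False | reach.get(down) or reach.get(right)
def dpCell (grid : List (List Int)) (vis : List (Int × Int)) (rc cc : Int)
    (t : PySem.Dict (Int × Int) Bool) (r c : Int) : PySem.Dict (Int × Int) Bool :=
  if r = rc - 1 ∧ c = cc - 1 then t.insert (r, c) true
  else if cellAt grid r c = 1 ∨ (r, c) ∈ vis then t.insert (r, c) false
  else t.insert (r, c) (t.getD (r + 1, c) false || t.getD (r, c + 1) false)

-- the two nested 'for … in range(…, …, -1)' loops building the table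
def buildDP (grid : List (List Int)) (vis : List (Int × Int)) (rc cc i j : Int) :
    PySem.Dict (Int × Int) Bool :=
  (PySem.List.pyRange (rc - 1) (i - 1) (-1)).foldl
    (fun t r => (PySem.List.pyRange (cc - 1) (j - 1) (-1)).foldl
      (fun t c => dpCell grid vis rc cc t r c) t)
    PySem.Dict.empty

def dfs_alt (grid : List (List Int)) (res : List (Int × Int)) (visited : List (Int × Int)) (row_count : Int) (col_count : Int) (i : Int) (j : Int) : Bool :=
  if i = row_count - 1 ∧ j = col_count - 1 then true
  else if row_count ≤ i ∨ col_count ≤ j ∨ cellAt grid i j = 1 ∨ (i, j) ∈ visited then false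
  else if (buildDP grid visited row_count col_count i j).getD (i, j) false then true
  -- Source B's reconstruction loop after this point only mutates res/visited, which the
  -- Bool-returning signature cannot observe, so it has no counterpart here
  else false

-- ===== PRECONDITION & SPEC =====
-- 'the start cell itself is safely readable and blocked/visited', as a Bool
def blockedStart (grid : List (List Int)) (visited : List (Int × Int)) (i j : Int) : Bool :=
  match PySem.List.pyGet? grid i with
  | none => false
  | some row =>
    match PySem.List.pyGet? row j with
    | none => false
    | some v => v = 1 || decide ((i, j) ∈ visited)

-- Pre_dfs excludes inputs on which an exploration may index outside the grid — mis-sized or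
-- non-rectangular grids and too-negative start indices — where Python A may raise IndexError
-- (and B's full-box DP scan may raise even where A's partial exploration happens to return).
def Pre_dfs (grid : List (List Int)) (res : List (Int × Int)) (visited : List (Int × Int)) (row_count : Int) (col_count : Int) (i : Int) (j : Int) : Prop :=
  (i = row_count - 1 ∧ j = col_count - 1) ∨ row_count ≤ i ∨ col_count ≤ j ∨
  blockedStart grid visited i j = true ∨
  (row_count = (grid.length : Int) ∧ (∀ row ∈ grid, (row.length : Int) = col_count) ∧
    -row_count ≤ i ∧ -col_count ≤ j)
instance (grid : List (List Int)) (res : List (Int × Int)) (visited : List (Int × Int)) (row_count : Int) (col_count : Int) (i : Int) (j : Int) : Decidable (Pre_dfs grid res visited row_count col_count i j) := by unfold Pre_dfs; infer_instance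

def pvWitness_dfs : List (List Int) × (List (Int × Int)) × (List (Int × Int)) × Int × Int × Int × Int :=
  ([[0, 0], [1, 0]], [], [], 2, 2, 0, 0)

def Spec_dfs (grid : List (List Int)) (res : List (Int × Int)) (visited : List (Int × Int)) (row_count : Int) (col_count : Int) (i : Int) (j : Int) (out : Bool) : Prop := out = dfs_alt grid res visited row_count col_count i j
instance (grid : List (List Int)) (res : List (Int × Int)) (visited : List (Int × Int)) (row_count : Int) (col_count : Int) (i : Int) (j : Int) (out : Bool) : Decidable (Spec_dfs grid res visited row_count col_count i j out) := by unfold Spec_dfs; infer_instance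

-- ===== CLAIM (what is proved, stated in full; the proofs are below) =====
def Claim_equal_dfs : Prop := ∀ (grid : List (List Int)) (res : List (Int × Int)) (visited : List (Int × Int)) (row_count : Int) (col_count : Int) (i : Int) (j : Int), Dom_dfs grid res visited row_count col_count i j → Pre_dfs grid res visited row_count col_count i j → Spec_dfs grid res visited row_count col_count i j (dfs grid res visited row_count col_count i j)

-- ===== LEMMAS AND PROOFS =====

-- pure reference semantics: reachability of the target by down/right moves, with exactly A's
-- (and B's) branch order; used only by the proofs below
def reachR (grid : List (List Int)) (vis : List (Int × Int)) (rc cc : Int) (i j : Int) : Bool :=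
  if i = rc - 1 ∧ j = cc - 1 then true
  else if rc ≤ i ∨ cc ≤ j ∨ cellAt grid i j = 1 ∨ (i, j) ∈ vis then false
  else reachR grid vis rc cc (i + 1) j || reachR grid vis rc cc i (j + 1)
termination_by ((rc - i).toNat + (cc - j).toNat)
decreasing_by
  all_goals ((try simp only [not_or, not_le] at *); omega)

-- reachR only looks at membership of cells in the quadrant at and beyond (i, j)
theorem reachR_congr (grid : List (List Int)) (rc cc : Int) :
    ∀ n (i j : Int), (rc - i).toNat + (cc - j).toNat = n →
    ∀ (v v' : List (Int × Int)),
      (∀ r c, i ≤ r → j ≤ c → (((r, c) ∈ v) ↔ ((r, c) ∈ v'))) →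
      reachR grid v rc cc i j = reachR grid v' rc cc i j := by
  intro n
  induction n using Nat.strong_induction_on with
  | _ n ih =>
    intro i j hn v v' hvv
    conv_lhs => rw [reachR]
    conv_rhs => rw [reachR]
    by_cases h1 : i = rc - 1 ∧ j = cc - 1
    · simp [h1]
    · simp only [if_neg h1]
      have hmem : ((i, j) ∈ v) ↔ ((i, j) ∈ v') := hvv i j le_rfl le_rfl
      by_cases h2 : rc ≤ i ∨ cc ≤ j ∨ cellAt grid i j = 1 ∨ (i, j) ∈ v
      · rw [if_pos h2, if_pos (by tauto)]
      · rw [if_neg h2, if_neg (by tauto)]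
        have hb : i < rc ∧ j < cc := by
          simp only [not_or, not_le] at h2; exact ⟨h2.1, h2.2.1⟩
        have e1 := ih ((rc - (i + 1)).toNat + (cc - j).toNat) (by omega) (i + 1) j rfl v v'
          (fun r c hr hc => hvv r c (by omega) hc)
        have e2 := ih ((rc - i).toNat + (cc - (j + 1)).toNat) (by omega) i (j + 1) rfl v v'
          (fun r c hr hc => hvv r c hr (by omega))
        rw [e1, e2]

-- blocking a cell from which the target is unreachable changes no reachability
theorem reachR_block (grid : List (List Int)) (rc cc : Int) (v : List (Int × Int)) (x : Int × Int)
    (hx : reachR grid v rc cc x.1 x.2 = false) :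
    ∀ n (i j : Int), (rc - i).toNat + (cc - j).toNat = n →
      reachR grid (PySem.Set.add v x) rc cc i j = reachR grid v rc cc i j := by
  intro n
  induction n using Nat.strong_induction_on with
  | _ n ih =>
    intro i j hn
    conv_lhs => rw [reachR]
    conv_rhs => rw [reachR]
    by_cases h1 : i = rc - 1 ∧ j = cc - 1
    · simp [h1]
    · simp only [if_neg h1]
      by_cases hx' : (i, j) = x
      · -- the blocked cell itself: both sides are false
        have : (i, j) ∈ PySem.Set.add v x := by
          rw [PySem.Set.mem_add]; right; exact hx'
        rw [if_pos (by tauto)]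
        have := hx
        rw [← hx', reachR, if_neg h1] at this
        by_cases h2 : rc ≤ i ∨ cc ≤ j ∨ cellAt grid i j = 1 ∨ (i, j) ∈ v
        · rw [if_pos h2]
        · rw [if_neg h2] at this ⊢
          exact this.symm
      · have hmem : ((i, j) ∈ PySem.Set.add v x) ↔ ((i, j) ∈ v) := by
          rw [PySem.Set.mem_add]; simp [hx']
        by_cases h2 : rc ≤ i ∨ cc ≤ j ∨ cellAt grid i j = 1 ∨ (i, j) ∈ v
        · rw [if_pos h2, if_pos (by tauto)]
        · rw [if_neg h2, if_neg (by tauto)]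
          have hb : i < rc ∧ j < cc := by
            simp only [not_or, not_le] at h2; exact ⟨h2.1, h2.2.1⟩
          rw [ih ((rc - (i + 1)).toNat + (cc - j).toNat) (by omega) (i + 1) j rfl,
              ih ((rc - i).toNat + (cc - (j + 1)).toNat) (by omega) i (j + 1) rfl]

-- the DFS computes reachR, and on failure its visited-set additions are reach-irrelevant
theorem dfsAux_reach (grid : List (List Int)) (rc cc : Int) :
    ∀ n (i j : Int), (rc - i).toNat + (cc - j).toNat = n →
    ∀ (res vis : List (Int × Int)),
      (dfsAux grid rc cc i j res vis).1 = reachR grid vis rc cc i j ∧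
      ((dfsAux grid rc cc i j res vis).1 = false →
        ∀ r c, reachR grid (dfsAux grid rc cc i j res vis).2.2 rc cc r c
             = reachR grid vis rc cc r c) := by
  intro n
  induction n using Nat.strong_induction_on with
  | _ n ih =>
    intro i j hn res vis
    rw [dfsAux]
    have hru : reachR grid vis rc cc i j =
        (if i = rc - 1 ∧ j = cc - 1 then true
         else if rc ≤ i ∨ cc ≤ j ∨ cellAt grid i j = 1 ∨ (i, j) ∈ vis then false
         else reachR grid vis rc cc (i + 1) j || reachR grid vis rc cc i (j + 1)) := by
      rw [reachR]
    rw [hru]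
    by_cases h1 : i = rc - 1 ∧ j = cc - 1
    · simp [h1]
    · simp only [if_neg h1]
      by_cases h2 : rc ≤ i ∨ cc ≤ j ∨ cellAt grid i j = 1 ∨ (i, j) ∈ vis
      · simp [h2]
      · simp only [if_neg h2]
        have hb : i < rc ∧ j < cc := by
          simp only [not_or, not_le] at h2; exact ⟨h2.1, h2.2.1⟩
        set vis1 := PySem.Set.add vis (i, j) with hvis1
        -- the added cell (i, j) lies strictly outside both children's quadrants
        have hq1 : reachR grid vis1 rc cc (i + 1) j = reachR grid vis rc cc (i + 1) j := by
          apply reachR_congr grid rc cc _ (i + 1) j rfl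
          intro r c hr hc
          rw [hvis1, PySem.Set.mem_add]
          have : (r, c) ≠ (i, j) := by intro h; cases h; omega
          simp [this]
        have hq2 : reachR grid vis1 rc cc i (j + 1) = reachR grid vis rc cc i (j + 1) := by
          apply reachR_congr grid rc cc _ i (j + 1) rfl
          intro r c hr hc
          rw [hvis1, PySem.Set.mem_add]
          have : (r, c) ≠ (i, j) := by intro h; cases h; omega
          simp [this]
        obtain ⟨ihA1, ihA2⟩ := ih ((rc - (i + 1)).toNat + (cc - j).toNat) (by omega) (i + 1) j rfl
          (res ++ [(i, j)]) vis1
        set p1 := dfsAux grid rc cc (i + 1) j (res ++ [(i, j)]) vis1 with hp1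
        by_cases hf1 : p1.1 = true
        · simp only [if_pos hf1]
          refine ⟨?_, by simp⟩
          rw [hf1] at ihA1
          rw [← hq1, ← ihA1]
          simp
        · rw [Bool.not_eq_true] at hf1
          simp only [hf1, if_neg Bool.false_ne_true]
          have hr1 : reachR grid vis rc cc (i + 1) j = false := by
            rw [← hq1, ← ihA1, hf1]
          have hstable : ∀ r c, reachR grid p1.2.2 rc cc r c = reachR grid vis1 rc cc r c :=
            ihA2 hf1
          obtain ⟨ihB1, ihB2⟩ := ih ((rc - i).toNat + (cc - (j + 1)).toNat) (by omega) i (j + 1) rfl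
            p1.2.1 p1.2.2
          set p2 := dfsAux grid rc cc i (j + 1) p1.2.1 p1.2.2 with hp2
          have hr2 : p2.1 = reachR grid vis rc cc i (j + 1) := by
            rw [ihB1, hstable, hq2]
          by_cases hf2 : p2.1 = true
          · simp only [if_pos hf2]
            refine ⟨?_, by simp⟩
            rw [hf2] at hr2
            rw [← hr2]
            simp
          · rw [Bool.not_eq_true] at hf2
            simp only [hf2, if_neg Bool.false_ne_true]
            have hrr : reachR grid vis rc cc i j = false := by
              rw [hru, if_neg h1, if_neg h2, hr1, ← hr2, hf2]
              simp
            constructor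
            · rw [hr1, ← hr2, hf2]
              simp
            · intro _ r c
              have hblock : ∀ w, reachR grid w rc cc i j = false →
                  reachR grid (PySem.Set.add w (i, j)) rc cc r c = reachR grid w rc cc r c :=
                fun w hw => reachR_block grid rc cc w (i, j) hw _ r c rfl
              rw [ihB2 hf2 r c, hstable r c, hvis1, hblock vis hrr]

-- DP-table invariant: 'done' cells hold exactly reachR
def DPDone (grid : List (List Int)) (vis : List (Int × Int)) (rc cc : Int)
    (t : PySem.Dict (Int × Int) Bool) (S : Int × Int → Prop) : Prop :=
  ∀ k : Int × Int, (S k → t.get? k = some (reachR grid vis rc cc k.1 k.2)) ∧ (¬ S k → t.get? k = none)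

theorem DPDone_congr (grid : List (List Int)) (vis : List (Int × Int)) (rc cc : Int)
    (t : PySem.Dict (Int × Int) Bool) (S S' : Int × Int → Prop)
    (h : DPDone grid vis rc cc t S) (hSS : ∀ k, S' k ↔ S k) :
    DPDone grid vis rc cc t S' := by
  intro k
  exact ⟨fun hk => (h k).1 ((hSS k).mp hk), fun hk => (h k).2 (fun hk' => hk ((hSS k).mpr hk'))⟩

-- a cell outside the grid box is a dead end
theorem reachR_out (grid : List (List Int)) (vis : List (Int × Int)) (rc cc : Int) (r c : Int)
    (h : rc ≤ r ∨ cc ≤ c) : reachR grid vis rc cc r c = false := by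
  rw [reachR]
  have h1 : ¬(r = rc - 1 ∧ c = cc - 1) := by omega
  rw [if_neg h1, if_pos (by omega)]

-- inserting one DP cell preserves the invariant, extending the done-set by that cell
theorem dpCell_done (grid : List (List Int)) (vis : List (Int × Int)) (rc cc i j : Int)
    (t : PySem.Dict (Int × Int) Bool) (S : Int × Int → Prop)
    (r c : Int) (hr : r < rc) (hcl : j ≤ c) (hcu : c < cc)
    (hS1 : r + 1 < rc → S (r + 1, c)) (hS1' : rc ≤ r + 1 → ¬ S (r + 1, c))
    (hS2 : c + 1 < cc → S (r, c + 1)) (hS2' : cc ≤ c + 1 → ¬ S (r, c + 1))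
    (h : DPDone grid vis rc cc t S) :
    DPDone grid vis rc cc (dpCell grid vis rc cc t r c)
      (fun k => S k ∨ k = (r, c)) := by
  have hval : ∀ k : Int × Int,
      ((dpCell grid vis rc cc t r c).get? k
        = if k = (r, c) then some (reachR grid vis rc cc r c) else t.get? k) := by
    intro k
    have hgd : t.getD (r + 1, c) false = reachR grid vis rc cc (r + 1) c := by
      by_cases hb : r + 1 < rc
      · rw [PySem.Dict.getD_eq_get?_getD, (h (r + 1, c)).1 (hS1 hb)]; rfl
      · rw [PySem.Dict.getD_eq_get?_getD, (h (r + 1, c)).2 (hS1' (by omega)),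
            reachR_out grid vis rc cc _ _ (by omega)]; rfl
    have hgr : t.getD (r, c + 1) false = reachR grid vis rc cc r (c + 1) := by
      by_cases hb : c + 1 < cc
      · rw [PySem.Dict.getD_eq_get?_getD, (h (r, c + 1)).1 (hS2 hb)]; rfl
      · rw [PySem.Dict.getD_eq_get?_getD, (h (r, c + 1)).2 (hS2' (by omega)),
            reachR_out grid vis rc cc _ _ (by omega)]; rfl
    rw [dpCell]
    by_cases h1 : r = rc - 1 ∧ c = cc - 1
    · rw [if_pos h1, PySem.Dict.get?_insert]
      have : reachR grid vis rc cc r c = true := by rw [reachR, if_pos h1]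
      rw [this]
    · rw [if_neg h1]
      by_cases h2 : cellAt grid r c = 1 ∨ (r, c) ∈ vis
      · rw [if_pos h2, PySem.Dict.get?_insert]
        have : reachR grid vis rc cc r c = false := by
          rw [reachR, if_neg h1, if_pos (by tauto)]
        rw [this]
      · rw [if_neg h2, PySem.Dict.get?_insert, hgd, hgr]
        have : reachR grid vis rc cc r c
            = (reachR grid vis rc cc (r + 1) c || reachR grid vis rc cc r (c + 1)) := by
          rw [reachR, if_neg h1, if_neg (by simp only [not_or, not_le] at h2 ⊢; exact ⟨hr, hcu, h2⟩)]
        rw [this]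
  intro k
  rw [hval k]
  constructor
  · intro hk
    by_cases he : k = (r, c)
    · rw [if_pos he, he]
    · rw [if_neg he]
      exact (h k).1 (by tauto)
  · intro hk
    rw [if_neg (fun he => hk (Or.inr he))]
    exact (h k).2 (fun hk' => hk (Or.inl hk'))

theorem dpRow_inv (grid : List (List Int)) (vis : List (Int × Int)) (rc cc i j : Int)
    (r : Int) (hr : r < rc) :
    ∀ n (c : Int), (c - (j - 1)).toNat = n → j - 1 ≤ c → c ≤ cc - 1 →
    ∀ t, DPDone grid vis rc cc t
        (fun k => (r < k.1 ∧ k.1 < rc ∧ j ≤ k.2 ∧ k.2 < cc) ∨ (k.1 = r ∧ c < k.2 ∧ k.2 < cc)) →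
      DPDone grid vis rc cc
        ((PySem.List.pyRange c (j - 1) (-1)).foldl (fun t c => dpCell grid vis rc cc t r c) t)
        (fun k => (r < k.1 ∧ k.1 < rc ∧ j ≤ k.2 ∧ k.2 < cc) ∨ (k.1 = r ∧ j ≤ k.2 ∧ k.2 < cc)) := by
  intro n
  induction n using Nat.strong_induction_on with
  | _ n ih =>
    intro c hn hcl hcu t hdone
    by_cases hstop : c ≤ j - 1
    · rw [PySem.List.pyRange_neg_one_eq_nil hstop]
      exact DPDone_congr _ _ _ _ _ _ _ hdone (fun k => by constructor <;> (intro h; omega))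
    · rw [PySem.List.pyRange_neg_one_cons (by omega), List.foldl_cons]
      have hstep := dpCell_done grid vis rc cc i j t _ r c hr (by omega) (by omega)
        (fun hb => by left; exact ⟨by omega, hb, by omega, by omega⟩)
        (fun hb h => by omega)
        (fun hb => by right; exact ⟨rfl, by omega, hb⟩)
        (fun hb h => by omega)
        hdone
      have := ih ((c - 1 - (j - 1)).toNat) (by omega) (c - 1) rfl (by omega) (by omega)
        (dpCell grid vis rc cc t r c)
        (DPDone_congr _ _ _ _ _ _ _ hstep (fun k => by
          obtain ⟨k1, k2⟩ := k
          simp only [Prod.mk.injEq]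
          omega))
      exact this

theorem dpAll_inv (grid : List (List Int)) (vis : List (Int × Int)) (rc cc i j : Int)
    (hj : j < cc) :
    ∀ n (r : Int), (r - (i - 1)).toNat = n → i - 1 ≤ r → r ≤ rc - 1 →
    ∀ t, DPDone grid vis rc cc t (fun k => r < k.1 ∧ k.1 < rc ∧ j ≤ k.2 ∧ k.2 < cc) →
      DPDone grid vis rc cc
        ((PySem.List.pyRange r (i - 1) (-1)).foldl
          (fun t r => (PySem.List.pyRange (cc - 1) (j - 1) (-1)).foldl
            (fun t c => dpCell grid vis rc cc t r c) t) t)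
        (fun k => i ≤ k.1 ∧ k.1 < rc ∧ j ≤ k.2 ∧ k.2 < cc) := by
  intro n
  induction n using Nat.strong_induction_on with
  | _ n ih =>
    intro r hn hrl hru t hdone
    by_cases hstop : r ≤ i - 1
    · rw [PySem.List.pyRange_neg_one_eq_nil hstop]
      exact DPDone_congr _ _ _ _ _ _ _ hdone (fun k => by constructor <;> intro h <;> omega)
    · rw [PySem.List.pyRange_neg_one_cons (show i - 1 < r by omega), List.foldl_cons]
      have hrow := dpRow_inv grid vis rc cc i j r (by omega) _ (cc - 1) rfl (by omega) le_rfl t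
        (DPDone_congr _ _ _ _ _ _ _ hdone (fun k => by constructor <;> intro h <;> omega))
      exact ih ((r - 1 - (i - 1)).toNat) (by omega) (r - 1) rfl (by omega) (by omega) _
        (DPDone_congr _ _ _ _ _ _ _ hrow (fun k => by constructor <;> intro h <;> omega))

theorem buildDP_getD (grid : List (List Int)) (vis : List (Int × Int)) (rc cc i j : Int)
    (hi : i < rc) (hj : j < cc) :
    (buildDP grid vis rc cc i j).getD (i, j) false = reachR grid vis rc cc i j := by
  have hempty : DPDone grid vis rc cc PySem.Dict.empty
      (fun k => rc - 1 < k.1 ∧ k.1 < rc ∧ j ≤ k.2 ∧ k.2 < cc) := by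
    intro k
    exact ⟨fun hk => by omega, fun _ => PySem.Dict.get?_empty k⟩
  have hall := dpAll_inv grid vis rc cc i j hj _ (rc - 1) rfl (by omega) le_rfl
    PySem.Dict.empty hempty
  rw [buildDP, PySem.Dict.getD_eq_get?_getD,
      (hall (i, j)).1 ⟨le_rfl, hi, le_rfl, hj⟩]
  rfl

-- the two ports agree on every input (the precondition is only needed for faithfulness of the
-- ports to Python, which raises IndexError outside it)
theorem dfs_eq_alt (grid : List (List Int)) (res visited : List (Int × Int))
    (rc cc i j : Int) : dfs grid res visited rc cc i j = dfs_alt grid res visited rc cc i j := by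
  have hA := (dfsAux_reach grid rc cc ((rc - i).toNat + (cc - j).toNat) i j rfl res visited).1
  rw [dfs, hA, dfs_alt]
  by_cases h1 : i = rc - 1 ∧ j = cc - 1
  · rw [if_pos h1, reachR, if_pos h1]
  · rw [if_neg h1]
    by_cases h2 : rc ≤ i ∨ cc ≤ j ∨ cellAt grid i j = 1 ∨ (i, j) ∈ visited
    · rw [if_pos h2, reachR, if_neg h1, if_pos h2]
    · have hb : i < rc ∧ j < cc := by
        simp only [not_or, not_le] at h2; exact ⟨h2.1, h2.2.1⟩
      rw [if_neg h2, buildDP_getD grid visited rc cc i j hb.1 hb.2]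
      cases reachR grid visited rc cc i j <;> simp

-- ===== VERDICT (by name: the statement is the Claim_ definition above) =====
theorem dfs_spec : Claim_equal_dfs := by
  intro grid res visited rc cc i j _ _
  unfold Spec_dfs
  exact dfs_eq_alt grid res visited rc cc i j
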